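-- pv_equiv track=rewrite | github.com/igiwowaner47-ui/profam | src/data/tokenizers.py | get_flat_residue_index_from_positions
-- ===== SOURCE A (Python) =====
-- def get_flat_residue_index_from_positions(
--     residue_positions,
--     max_res_pos_in_seq: int = 1024,
--     prepend_index=0,
--     append_index=0,
--     sep_index=0,
--     num_start_tokens=1,
--     num_end_tokens=1,
-- ):
--     # TODO: maybe raise exception if max_res_pos_in_seq exceeded rather than duplicating...
--     if len(residue_positions) > 0:
--         flat_indices = [prepend_index] * num_start_tokens
--         for sequence_positions in residue_positions[:-1]:
--             # add 1 so that sep doesnt have same index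
--             # n.b. that convert_sequence_with_positions is also already 1-based
--             flat_indices += [
--                 min(p + 1, max_res_pos_in_seq - 1) for p in sequence_positions
--             ]
--             flat_indices.append(sep_index)
--         flat_indices += [
--             min(p + 1, max_res_pos_in_seq - 1) for p in residue_positions[-1]
--         ]
--         flat_indices += [append_index] * num_end_tokens  # no [SEP] at end of MSA
--         return flat_indices
--     else:
--         return []
-- ===== SOURCE B (Python) =====
-- def get_flat_residue_index_from_positions(
--     residue_positions,
--     max_res_pos_in_seq: int = 1024,
--     prepend_index=0,
--     append_index=0,
--     sep_index=0,
--     num_start_tokens=1,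
--     num_end_tokens=1,
-- ):
--     if not residue_positions:
--         return []
--     cap = max_res_pos_in_seq - 1
--
--     def join(seqs):
--         # recursion on the structure: one group, or group + sep + rest
--         head = [min(p + 1, cap) for p in seqs[0]]
--         if len(seqs) == 1:
--             return head
--         return head + [sep_index] + join(seqs[1:])
--
--     return (
--         [prepend_index] * num_start_tokens
--         + join(residue_positions)
--         + [append_index] * num_end_tokens
--     )
-- ===== Notes on version B (the rewrite author's own statement) =====
-- stated objective: alternative
-- what changed: B replaces A's imperative accumulator loop over residue_positions[:-1] (appending a separator after each group, then the slice's-last group) by a direct structural recursion join(seqs) that returns one clamped group or group + [sep] + join(rest), with start/end token padding applied once around the recursion.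
import Mathlib
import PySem

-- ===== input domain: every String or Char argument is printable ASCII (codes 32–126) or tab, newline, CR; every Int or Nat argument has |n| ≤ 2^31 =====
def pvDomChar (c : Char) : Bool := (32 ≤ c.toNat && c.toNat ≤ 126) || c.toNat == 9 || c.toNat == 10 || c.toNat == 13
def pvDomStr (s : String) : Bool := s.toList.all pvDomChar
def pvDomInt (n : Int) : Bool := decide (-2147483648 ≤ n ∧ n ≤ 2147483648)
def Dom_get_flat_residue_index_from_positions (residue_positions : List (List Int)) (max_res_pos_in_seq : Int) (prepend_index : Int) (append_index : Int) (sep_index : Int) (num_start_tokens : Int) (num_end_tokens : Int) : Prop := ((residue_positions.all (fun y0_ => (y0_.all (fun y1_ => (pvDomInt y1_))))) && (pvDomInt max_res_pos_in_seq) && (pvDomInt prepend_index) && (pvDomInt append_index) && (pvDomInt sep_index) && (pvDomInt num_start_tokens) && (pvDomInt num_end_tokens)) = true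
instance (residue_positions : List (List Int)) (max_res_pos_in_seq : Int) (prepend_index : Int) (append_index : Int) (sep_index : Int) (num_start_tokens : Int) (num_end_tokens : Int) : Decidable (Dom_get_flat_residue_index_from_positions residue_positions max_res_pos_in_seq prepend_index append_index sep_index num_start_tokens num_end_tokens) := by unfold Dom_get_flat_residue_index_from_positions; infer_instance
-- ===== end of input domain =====

-- B replaces A's iterative append-sep-after-each-of-all-but-last loop with a direct structural
-- recursion (group, or group + sep + recurse on the rest) — alternative decomposition, same cost.
-- ===== PORT A =====
def get_flat_residue_index_from_positions (residue_positions : List (List Int)) (max_res_pos_in_seq : Int) (prepend_index : Int) (append_index : Int) (sep_index : Int) (num_start_tokens : Int) (num_end_tokens : Int) : List Int :=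
  if residue_positions.length > 0 then
    let flat := List.replicate num_start_tokens.toNat prepend_index
    let flat := (PySem.List.slice residue_positions none (some (-1))).foldl
      (fun acc seq =>
        (acc ++ seq.map (fun p => min (p + 1) (max_res_pos_in_seq - 1))) ++ [sep_index]) flat
    -- residue_positions[-1]: pyGet? at -1; the guard makes it 'some', getD [] never fires
    let flat := flat ++
      ((PySem.List.pyGet? residue_positions (-1)).getD []).map
        (fun p => min (p + 1) (max_res_pos_in_seq - 1))
    flat ++ List.replicate num_end_tokens.toNat append_index
  else []

-- ===== PORT B =====
-- helper of B: the recursive 'join' (seqs[0], len==1 test, seqs[1:] recursion)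
def pvJoinRec (cap sep_index : Int) : List (List Int) → List Int
  | [] => []                       -- unreachable: B calls join only on nonempty lists
  | [s] => s.map (fun p => min (p + 1) cap)
  | s :: t :: rest =>
      s.map (fun p => min (p + 1) cap) ++ [sep_index] ++ pvJoinRec cap sep_index (t :: rest)

def get_flat_residue_index_from_positions_alt (residue_positions : List (List Int)) (max_res_pos_in_seq : Int) (prepend_index : Int) (append_index : Int) (sep_index : Int) (num_start_tokens : Int) (num_end_tokens : Int) : List Int :=
  match residue_positions with
  | [] => []
  | _ :: _ =>
    List.replicate num_start_tokens.toNat prepend_index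
      ++ pvJoinRec (max_res_pos_in_seq - 1) sep_index residue_positions
      ++ List.replicate num_end_tokens.toNat append_index

-- ===== PRECONDITION & SPEC =====
def Spec_get_flat_residue_index_from_positions (residue_positions : List (List Int)) (max_res_pos_in_seq : Int) (prepend_index : Int) (append_index : Int) (sep_index : Int) (num_start_tokens : Int) (num_end_tokens : Int) (out : List Int) : Prop := out = get_flat_residue_index_from_positions_alt residue_positions max_res_pos_in_seq prepend_index append_index sep_index num_start_tokens num_end_tokens
instance (residue_positions : List (List Int)) (max_res_pos_in_seq : Int) (prepend_index : Int) (append_index : Int) (sep_index : Int) (num_start_tokens : Int) (num_end_tokens : Int) (out : List Int) : Decidable (Spec_get_flat_residue_index_from_positions residue_positions max_res_pos_in_seq prepend_index append_index sep_index num_start_tokens num_end_tokens out) := by unfold Spec_get_flat_residue_index_from_positions; infer_instance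

-- ===== CLAIM (what is proved, stated in full; the proofs are below) =====
def Claim_equal_get_flat_residue_index_from_positions : Prop := ∀ (residue_positions : List (List Int)) (max_res_pos_in_seq : Int) (prepend_index : Int) (append_index : Int) (sep_index : Int) (num_start_tokens : Int) (num_end_tokens : Int), Dom_get_flat_residue_index_from_positions residue_positions max_res_pos_in_seq prepend_index append_index sep_index num_start_tokens num_end_tokens → Spec_get_flat_residue_index_from_positions residue_positions max_res_pos_in_seq prepend_index append_index sep_index num_start_tokens num_end_tokens (get_flat_residue_index_from_positions residue_positions max_res_pos_in_seq prepend_index append_index sep_index num_start_tokens num_end_tokens)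

-- ===== LEMMAS AND PROOFS =====

-- A's loop over dropLast plus its last-group step equals init ++ the recursive join
theorem pvKey (cap sep : Int) (x : List Int) (xs : List (List Int)) (init : List Int) :
    ((x :: xs).dropLast.foldl
        (fun acc seq => (acc ++ seq.map (fun p => min (p + 1) cap)) ++ [sep]) init)
      ++ (((x :: xs).getLast?).getD []).map (fun p => min (p + 1) cap)
    = init ++ pvJoinRec cap sep (x :: xs) := by
  induction xs generalizing x init with
  | nil => simp [pvJoinRec]
  | cons y ys ih =>
    have h1 : (x :: y :: ys).dropLast = x :: (y :: ys).dropLast := rfl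
    have h2 : (x :: y :: ys).getLast? = (y :: ys).getLast? := rfl
    rw [h1, h2, List.foldl_cons,
      ih y ((init ++ x.map (fun p => min (p + 1) cap)) ++ [sep])]
    simp [pvJoinRec]

-- ===== VERDICT (by name: the statement is the Claim_ definition above) =====
theorem get_flat_residue_index_from_positions_spec : Claim_equal_get_flat_residue_index_from_positions := by
  intro rp m pre app sep ns ne _
  unfold Spec_get_flat_residue_index_from_positions
  cases rp with
  | nil => rfl
  | cons x xs =>
    simp only [get_flat_residue_index_from_positions, get_flat_residue_index_from_positions_alt,
      List.length_cons, PySem.List.slice_to_neg_one, PySem.List.pyGet?_neg_one]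
    rw [if_pos (by omega)]
    rw [pvKey (m - 1) sep x xs (List.replicate ns.toNat pre)]
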